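-- pv_equiv track=rewrite | github.com/Apps4Athens-Hackathon-2-0/53_Intellectiva | regression_model/optimizer.py | _airport_departures_for_hour
-- ===== SOURCE A (Python) =====
-- AIRPORT_HEADWAY_MINUTES = 36
--
-- def _airport_departures_for_hour(hour: int) -> list[int]:
--     """
--     Return sorted departure minutes within `hour` for the airport branch.
--     The 36-minute cycle runs continuously from 00:00 across the full day,
--     ensuring phase consistency across hour boundaries.
--     """
--     departures = []
--     minute = 0
--     while minute < 60 * 24:
--         if minute // 60 == hour:
--             departures.append(minute % 60)
--         elif minute // 60 > hour:
--             break
--         minute += AIRPORT_HEADWAY_MINUTES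
--     return sorted(departures)
-- ===== SOURCE B (Python) =====
-- def _airport_departures_for_hour(hour: int) -> list[int]:
--     """Direct computation for one hour of the continuous 36-minute cycle."""
--     if not 0 <= hour <= 23:
--         return []
--     lo = hour * 60
--     start = -(-lo // 36) * 36  # first multiple of 36 at or after lo
--     return [m % 60 for m in range(start, lo + 60, 36)]
-- ===== Notes on version B (the rewrite author's own statement) =====
-- stated objective: simpler
-- what changed: Replaced A's whole-day scan over every 36-minute tick (with a break once past the hour) by a direct closed-form computation: guard 0<=hour<=23, find the first multiple of 36 at or after hour*60 by ceiling division, and list the minutes of that single hour.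
import Mathlib
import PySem

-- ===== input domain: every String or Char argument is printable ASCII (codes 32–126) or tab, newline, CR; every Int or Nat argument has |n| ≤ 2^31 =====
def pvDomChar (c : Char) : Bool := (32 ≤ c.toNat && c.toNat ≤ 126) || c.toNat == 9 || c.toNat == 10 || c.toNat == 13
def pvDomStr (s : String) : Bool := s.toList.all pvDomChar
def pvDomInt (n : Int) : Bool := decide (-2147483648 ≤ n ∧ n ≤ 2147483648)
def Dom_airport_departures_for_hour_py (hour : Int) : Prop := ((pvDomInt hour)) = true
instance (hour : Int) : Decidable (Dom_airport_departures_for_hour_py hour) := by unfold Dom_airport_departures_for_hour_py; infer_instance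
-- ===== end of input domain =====

-- B replaces A's whole-day 36-minute scan with a direct computation over the single hour (simpler; faster by a constant factor).

-- ===== PORT A =====
-- A's while-loop: fuel bounds the iteration count (the loop makes at most 40 steps of 36
-- minutes before `minute < 60*24` fails); each step is a literal transcription of the body.
def airportLoopA (hour : Int) (fuel : Nat) (minute : Int) (departures : List Int) : List Int :=
  match fuel with
  | 0 => departures
  | fuel + 1 =>
    if minute < 60 * 24 then
      if PySem.Int.floordiv minute 60 = hour then
        airportLoopA hour fuel (minute + 36) (departures ++ [PySem.Int.mod minute 60])
      else if PySem.Int.floordiv minute 60 > hour then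
        departures
      else
        airportLoopA hour fuel (minute + 36) departures
    else departures

def airport_departures_for_hour_py (hour : Int) : List Int :=
  PySem.List.sorted (airportLoopA hour 41 0 []) (fun x => x) false

-- ===== PORT B =====
def airport_departures_for_hour_py_alt (hour : Int) : List Int :=
  if 0 ≤ hour ∧ hour ≤ 23 then
    let lo := hour * 60
    let start := (-(PySem.Int.floordiv (-lo) 36)) * 36
    (PySem.List.pyRange start (lo + 60) 36).map (fun m => PySem.Int.mod m 60)
  else []

-- ===== PRECONDITION & SPEC =====
def Spec_airport_departures_for_hour_py (hour : Int) (out : List Int) : Prop := out = airport_departures_for_hour_py_alt hour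
instance (hour : Int) (out : List Int) : Decidable (Spec_airport_departures_for_hour_py hour out) := by unfold Spec_airport_departures_for_hour_py; infer_instance

-- ===== CLAIM (what is proved, stated in full; the proofs are below) =====
def Claim_equal_airport_departures_for_hour_py : Prop := ∀ (hour : Int), Dom_airport_departures_for_hour_py hour → Spec_airport_departures_for_hour_py hour (airport_departures_for_hour_py hour)

-- ===== LEMMAS AND PROOFS =====

-- A's loop never appends and never breaks early when hour ≥ 24: it just exhausts the day.
theorem airportLoopA_ge24 (hour : Int) (h24 : 24 ≤ hour) :
    ∀ (fuel : Nat) (minute : Int) (deps : List Int), 0 ≤ minute →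
      airportLoopA hour fuel minute deps = deps := by
  intro fuel
  induction fuel with
  | zero => intro minute deps _; rfl
  | succ n ih =>
    intro minute deps hm
    unfold airportLoopA
    by_cases hlt : minute < 60 * 24
    · have hfd : PySem.Int.floordiv minute 60 = minute / 60 :=
        PySem.Int.floordiv_eq_ediv_of_pos (by omega)
      have h1 : PySem.Int.floordiv minute 60 ≠ hour := by rw [hfd]; omega
      have h2 : ¬ PySem.Int.floordiv minute 60 > hour := by rw [hfd]; omega
      simp only [if_pos hlt, if_neg h1, if_neg h2]
      exact ih (minute + 36) deps (by omega)
    · rw [if_neg hlt]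

-- A's loop breaks on the very first step when hour < 0.
theorem airportLoopA_neg (hour : Int) (hneg : hour < 0) :
    airportLoopA hour 41 0 [] = [] := by
  unfold airportLoopA
  have h1 : ¬ ((0 : Int) = hour) := by omega
  simp [h1, hneg]

-- ===== VERDICT (by name: the statement is the Claim_ definition above) =====
theorem airport_departures_for_hour_py_spec : Claim_equal_airport_departures_for_hour_py := by
  intro hour _
  unfold Spec_airport_departures_for_hour_py airport_departures_for_hour_py airport_departures_for_hour_py_alt
  by_cases h0 : 0 ≤ hour
  · by_cases h23 : hour ≤ 23
    · interval_cases hour <;> decide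
    · rw [if_neg (by omega), airportLoopA_ge24 hour (by omega) 41 0 [] (by omega)]
      decide
  · rw [if_neg (by omega), airportLoopA_neg hour (by omega)]
    decide
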